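-- pv_equiv track=rewrite | github.com/ksye6/ksye6 | MSDM5002基础Python可视化/课件/L4/2. Solve_XYZ_V1.py | func_check
-- ===== SOURCE A (Python) =====
-- def func_check(xx,yy,zz):
--     get_result=0
--     for x in xx:
--         for y in yy:
--             for z in zz:
--                 if x**3+y**3+z**3 == The_number:
--                     get_result=1
--                     return x,y,z,get_result
--     return x,y,z,get_result
--
-- The_number=42
-- ===== SOURCE B (Python) =====
-- The_number = 42
--
-- def func_check(xx, yy, zz):
--     # Stage 1: map each cube z**3 to the FIRST z in zz with that cube, by
--     # iterating zz in reverse and overwriting (earlier elements win).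
--     cube_owner = {}
--     for z in reversed(zz):
--         cube_owner[z ** 3] = z
--     # Stage 2: flatten the (x, y) search space and make ONE pass over it,
--     # looking the needed remainder up in O(1).
--     pairs = [(x, y) for x in xx for y in yy]
--     for x, y in pairs:
--         z = cube_owner.get(The_number - x ** 3 - y ** 3)
--         if z is not None:
--             return x, y, z, 1
--     return xx[-1], yy[-1], zz[-1], 0
-- ===== Notes on version B (the rewrite author's own statement) =====
-- stated objective: faster
-- what changed: Replaced A's triple nested scan by two staged passes: a reversed-overwrite hash map from each cube z**3 to the first z carrying it, then one linear pass over the flattened (x,y) pair list with an O(1) remainder lookup, giving O(|zz| + |xx||yy|) instead of O(|xx||yy||zz|).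
import Mathlib
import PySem

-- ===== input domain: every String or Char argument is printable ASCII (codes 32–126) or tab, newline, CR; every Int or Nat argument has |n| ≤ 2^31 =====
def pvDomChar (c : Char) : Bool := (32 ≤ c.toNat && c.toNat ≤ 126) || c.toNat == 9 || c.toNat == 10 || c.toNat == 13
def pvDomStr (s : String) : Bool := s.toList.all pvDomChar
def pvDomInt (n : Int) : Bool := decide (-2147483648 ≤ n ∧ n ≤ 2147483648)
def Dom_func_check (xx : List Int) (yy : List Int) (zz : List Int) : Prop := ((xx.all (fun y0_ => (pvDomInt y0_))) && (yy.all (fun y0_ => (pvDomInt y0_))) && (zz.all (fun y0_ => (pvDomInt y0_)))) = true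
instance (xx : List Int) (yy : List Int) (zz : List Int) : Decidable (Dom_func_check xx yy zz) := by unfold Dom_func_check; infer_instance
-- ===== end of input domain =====

-- B stages the search: a reversed-overwrite hash map cube → first z, then one
-- pass over the flattened (x, y) pairs with an O(1) lookup (asymptotically faster).

-- ===== PORT A =====
-- innermost loop: for z in zz: if x**3+y**3+z**3 == 42: return z (as a hit)
def pvAZ (x y : Int) (zz : List Int) : Option Int :=
  match zz with
  | [] => none
  | z :: rest => if x ^ 3 + y ^ 3 + z ^ 3 = 42 then some z else pvAZ x y rest

-- middle loop over yy
def pvAY (x : Int) (yy zz : List Int) : Option (Int × Int × Int) :=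
  match yy with
  | [] => none
  | y :: rest =>
    match pvAZ x y zz with
    | some z => some (x, y, z)
    | none => pvAY x rest zz

-- outer loop over xx
def pvAX (xx yy zz : List Int) : Option (Int × Int × Int) :=
  match xx with
  | [] => none
  | x :: rest =>
    match pvAY x yy zz with
    | some r => some r
    | none => pvAX rest yy zz

-- after the loops, A returns the leftover loop variables = last elements, get_result = 0
def func_check (xx : List Int) (yy : List Int) (zz : List Int) : List Int :=
  match pvAX xx yy zz with
  | some (x, y, z) => [x, y, z, 1]
  | none => [(xx.getLast?).getD 0, (yy.getLast?).getD 0, (zz.getLast?).getD 0, 0]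

-- ===== PORT B =====
-- cube_owner = {}; for z in reversed(zz): cube_owner[z**3] = z
def pvBDict (zz : List Int) : PySem.Dict Int Int :=
  zz.reverse.foldl (fun d z => d.insert (z ^ 3) z) PySem.Dict.empty

-- pairs = [(x, y) for x in xx for y in yy]
def pvBPairs (xx yy : List Int) : List (Int × Int) :=
  xx.flatMap (fun x => yy.map (fun y => (x, y)))

-- one pass over pairs: first pair whose remainder is a known cube
def func_check_alt (xx : List Int) (yy : List Int) (zz : List Int) : List Int :=
  let d := pvBDict zz
  match (pvBPairs xx yy).findSome?
      (fun p => (d.get? (42 - p.1 ^ 3 - p.2 ^ 3)).map (fun z => (p.1, p.2, z))) with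
  | some (x, y, z) => [x, y, z, 1]
  | none => [((PySem.List.pyGet? xx (-1)).getD 0), ((PySem.List.pyGet? yy (-1)).getD 0), ((PySem.List.pyGet? zz (-1)).getD 0), 0]

-- ===== PRECONDITION & SPEC =====
-- A raises UnboundLocalError (an unbound leftover loop variable at the final return)
-- whenever any of the three lists is empty and no triple is found, so empty lists are excluded.
def Pre_func_check (xx : List Int) (yy : List Int) (zz : List Int) : Prop :=
  xx ≠ [] ∧ yy ≠ [] ∧ zz ≠ []
instance (xx : List Int) (yy : List Int) (zz : List Int) : Decidable (Pre_func_check xx yy zz) := by unfold Pre_func_check; infer_instance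
def pvWitness_func_check : List Int × List Int × List Int := ([1, 2], [3], [-5, 0])

def Spec_func_check (xx : List Int) (yy : List Int) (zz : List Int) (out : List Int) : Prop := out = func_check_alt xx yy zz
instance (xx : List Int) (yy : List Int) (zz : List Int) (out : List Int) : Decidable (Spec_func_check xx yy zz out) := by unfold Spec_func_check; infer_instance

-- ===== CLAIM =====
def Claim_equal_func_check : Prop := ∀ (xx : List Int) (yy : List Int) (zz : List Int), Dom_func_check xx yy zz → Pre_func_check xx yy zz → Spec_func_check xx yy zz (func_check xx yy zz)

-- ===== LEMMAS AND PROOFS =====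

-- the reversed-overwrite dict answers 'first z in zz with z^3 = r'
theorem pvBDict_cons (z : Int) (rest : List Int) :
    pvBDict (z :: rest) = (pvBDict rest).insert (z ^ 3) z := by
  unfold pvBDict
  simp [List.foldl_reverse]

-- A's inner scan computes exactly what B's dict lookup returns
theorem pvAZ_eq (x y : Int) (zz : List Int) :
    pvAZ x y zz = (pvBDict zz).get? (42 - x ^ 3 - y ^ 3) := by
  induction zz with
  | nil => simp [pvAZ, pvBDict, PySem.Dict.get?_empty]
  | cons z rest ih =>
    rw [pvBDict_cons, PySem.Dict.get?_insert]
    simp only [pvAZ, ih]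
    by_cases h : x ^ 3 + y ^ 3 + z ^ 3 = 42
    · have hz : 42 - x ^ 3 - y ^ 3 = z ^ 3 := by omega
      simp [h, hz]
    · have hz : ¬ (42 - x ^ 3 - y ^ 3 = z ^ 3) := by omega
      simp [h, hz]

theorem pvAY_eq (x : Int) (yy zz : List Int) :
    pvAY x yy zz =
      yy.findSome? (fun y => ((pvBDict zz).get? (42 - x ^ 3 - y ^ 3)).map (fun z => (x, y, z))) := by
  induction yy with
  | nil => rfl
  | cons y rest ih =>
    simp only [pvAY, List.findSome?_cons, pvAZ_eq, ih]
    rcases (pvBDict zz).get? (42 - x ^ 3 - y ^ 3) with _ | z <;> simp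

theorem pvAX_eq (xx yy zz : List Int) :
    pvAX xx yy zz =
      (pvBPairs xx yy).findSome?
        (fun p => ((pvBDict zz).get? (42 - p.1 ^ 3 - p.2 ^ 3)).map (fun z => (p.1, p.2, z))) := by
  induction xx with
  | nil => rfl
  | cons x rest ih =>
    simp only [pvBPairs, List.flatMap_cons, List.findSome?_append, List.findSome?_map,
      Function.comp_def]
    simp only [pvAX, pvAY_eq, ih, pvBPairs]
    cases yy.findSome? (fun y => Option.map (fun z => (x, y, z)) ((pvBDict zz).get? (42 - x ^ 3 - y ^ 3))) <;> simp

theorem pyGet_last (l : List Int) (h : l ≠ []) :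
    (PySem.List.pyGet? l (-1)).getD 0 = (l.getLast?).getD 0 := by
  have hlen : 0 < l.length := List.length_pos_iff.mpr h
  have hlt : l.length - 1 < l.length := by omega
  simp only [PySem.List.pyGet?, PySem.List.pyIdx?]
  have hneg : ¬ ((0:Int) ≤ -1) := by norm_num
  have hge : -(l.length : Int) ≤ -1 := by omega
  rw [if_neg hneg, if_pos hge]
  simp [List.getLast?_eq_getElem?, List.getElem?_eq_getElem hlt]

-- ===== VERDICT =====
theorem func_check_spec : Claim_equal_func_check := by
  intro xx yy zz _ hpre
  obtain ⟨hx, hy, hz⟩ := hpre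
  unfold Spec_func_check func_check func_check_alt
  rw [pvAX_eq, pyGet_last xx hx, pyGet_last yy hy, pyGet_last zz hz]
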